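/- GENERATED by farm/mkstatement.py from design/units.tsv (unit `start_decoder.R18`) and the assertions of Vorbis/Spec/StartDecoderB.lean — do not edit.
   THE STATEMENT of the proof unit `start_decoder.R18`: segment R18 of `start_decoder` (44 instructions; entries 0x116784;
   exits 0x116059; ranges 0x116784-0x11682c)
   takes each of its entry assertions to one of its exit assertions (`Vorbis.Spec.StartDecoder.SegR18`), given the contracts of its callees.
   What the names mean: Vorbis/Spec/Basic.lean (the shared hypotheses), Vorbis/Spec/StartDecoderB.lean (the assertions). The theorem to prove:
   `theorem start_decoder_R18_ok : Vorbis.Spec.start_decoder_R18.Statement`. -/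
import Vorbis.Spec.StartDecoderB
namespace Vorbis.Spec.start_decoder_R18
open X86 X86.User Asan

/-- The statement of unit `start_decoder.R18`. -/
def Statement : Prop :=
  ∀ (Lay : Layout) (_hLay : Lay.hi = 0x1000000) (μ : Microarch) (_hμ : UserX.MicroOK μ) (u₀ : State)
    (_hcode : HasCodeNat Lay u₀ Vorbis.L.start_decoder.entry Vorbis.Code.code_start_decoder.nat Vorbis.L.start_decoder.size)
    (_h_asan_load8_noabort : Asan.SmallCheck Lay μ Vorbis.WayInv (Vorbis.CodeOK u₀) [.rax, .rcx, .rdx] 8 Vorbis.L.__asan_load8_noabort.entry)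
    (_h_asan_load2_noabort : Asan.SmallCheck Lay μ Vorbis.WayInv (Vorbis.CodeOK u₀) [.rax, .rcx, .rdx] 2 Vorbis.L.__asan_load2_noabort.entry)
    (_h_asan_load4_noabort : Asan.SmallCheck Lay μ Vorbis.WayInv (Vorbis.CodeOK u₀) [.rax, .rcx, .rdx] 4 Vorbis.L.__asan_load4_noabort.entry),
    Vorbis.Spec.StartDecoder.SegR18 Lay μ u₀

end Vorbis.Spec.start_decoder_R18
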